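-- pv_equiv track=rewrite | github.com/KonradSilenski/Apex-Services-Group-Assistant | sorCodeModel/learnLayer/evidence_core.py | _nearest_label_by_tokens
-- ===== SOURCE A (Python) =====
-- from typing import Any, Dict, Iterable, List, Optional, Set, Tuple
--
-- def _nearest_label_by_tokens(words: List[str], hit_index: int, classifier) -> Optional[str]:
--     best_label = None
--     best_d = 9999
--     for label, toks in classifier:
--         for i, w in enumerate(words):
--             if w in toks:
--                 d = abs(i - hit_index)
--                 if d < best_d:
--                     best_d = d
--                     best_label = label
--     return best_label
-- ===== SOURCE B (Python) =====
-- from typing import List, Optional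
--
-- def _nearest_label_by_tokens(words: List[str], hit_index: int, classifier) -> Optional[str]:
--     # Build a token -> index-of-first-label-containing-it map once, then make a
--     # single pass over the words tracking the least (distance, label index) key.
--     labels = []
--     first_label = {}
--     for idx, (label, toks) in enumerate(classifier):
--         labels.append(label)
--         for t in toks:
--             first_label.setdefault(t, idx)
--     best = None
--     for i, w in enumerate(words):
--         li = first_label.get(w)
--         if li is not None:
--             key = (abs(i - hit_index), li)
--             if best is None or key < best:
--                 best = key
--     return None if best is None else labels[best[1]]
-- ===== Notes on version B (the rewrite author's own statement) =====
-- stated objective: faster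
-- what changed: Replaces A's nested scan of every (label, word) pair (list membership inside a double loop) with a token->first-label-index dictionary built once from the classifier, followed by a single pass over the words tracking the least (distance, label index) key.
-- intended difference: On inputs where some word matches a classifier token but every matching word lies at distance >= 9999 from hit_index, A returns None because of its accidental best_d = 9999 sentinel, while B returns the genuinely nearest matching label, which is the intended value since 9999 is just a makeshift infinity. — e.g. on _nearest_label_by_tokens(["a"], 10000, [("L", ["a"])]): A returns none, B returns some "L"
import Mathlib
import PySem

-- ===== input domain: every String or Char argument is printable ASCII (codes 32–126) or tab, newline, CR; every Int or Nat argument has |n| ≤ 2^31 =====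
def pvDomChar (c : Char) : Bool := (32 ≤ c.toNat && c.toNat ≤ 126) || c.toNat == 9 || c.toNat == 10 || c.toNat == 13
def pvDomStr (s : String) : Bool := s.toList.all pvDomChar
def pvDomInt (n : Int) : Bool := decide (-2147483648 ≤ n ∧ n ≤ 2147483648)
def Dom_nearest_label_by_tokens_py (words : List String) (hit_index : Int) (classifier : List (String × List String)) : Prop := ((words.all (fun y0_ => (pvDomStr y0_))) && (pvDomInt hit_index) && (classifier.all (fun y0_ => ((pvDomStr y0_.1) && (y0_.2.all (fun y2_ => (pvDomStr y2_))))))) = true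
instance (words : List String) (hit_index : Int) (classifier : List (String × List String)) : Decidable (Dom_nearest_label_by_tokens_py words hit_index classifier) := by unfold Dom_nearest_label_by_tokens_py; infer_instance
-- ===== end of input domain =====

-- B replaces A's scan of every (label, word) pair by a token -> first-label-index dictionary
-- built once from the classifier plus a single pass over the words tracking the least
-- (distance, label index) key; objective: faster (the per-word scan of all labels disappears).

-- ===== PORT A =====
def nearest_label_by_tokens_py (words : List String) (hit_index : Int) (classifier : List (String × List String)) : Option String :=
  (classifier.foldl
    (fun (st : Option String × Int) p =>
      (PySem.List.enumerate words).foldl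
        (fun st iw =>
          if iw.2 ∈ p.2 then
            let d := |iw.1 - hit_index|
            if d < st.2 then (some p.1, d) else st
          else st)
        st)
    (none, 9999)).1

-- ===== PORT B =====
def nearest_label_by_tokens_py_alt (words : List String) (hit_index : Int) (classifier : List (String × List String)) : Option String :=
  -- labels list and token -> first label index dictionary, built in one pass over classifier
  let built : List String × PySem.Dict String Int :=
    (PySem.List.enumerate classifier).foldl
      (fun acc kp =>
        (acc.1 ++ [kp.2.1],
         kp.2.2.foldl (fun d t => if (d.get? t).isNone then d.insert t kp.1 else d) acc.2))
      ([], PySem.Dict.empty)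
  -- one pass over the words, keeping the least (distance, label index) key
  let best : Option (Int × Int) :=
    (PySem.List.enumerate words).foldl
      (fun best iw =>
        match built.2.get? iw.2 with
        | none => best
        | some li =>
          let key := (|iw.1 - hit_index|, li)
          match best with
          | none => some key
          | some b => if key.1 < b.1 ∨ (key.1 = b.1 ∧ key.2 < b.2) then some key else best)
      none
  match best with
  | none => none
  | some b => PySem.List.pyGet? built.1 b.2

-- ===== PRECONDITION & SPEC =====
-- On inputs where some word matches a classifier token but every matching word lies at
-- distance ≥ 9999 from hit_index, A returns none because of its accidental best_d = 9999
-- sentinel, while B returns the genuinely nearest matching label, which is the intended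
-- value since 9999 is just a makeshift infinity.
def D_nearest_label_by_tokens_py (words : List String) (hit_index : Int) (classifier : List (String × List String)) : Prop :=
  (∃ iw ∈ PySem.List.enumerate words, ∃ p ∈ classifier, iw.2 ∈ p.2) ∧
  (∀ iw ∈ PySem.List.enumerate words, (∃ p ∈ classifier, iw.2 ∈ p.2) → 9999 ≤ |iw.1 - hit_index|)
instance (words : List String) (hit_index : Int) (classifier : List (String × List String)) : Decidable (D_nearest_label_by_tokens_py words hit_index classifier) := by unfold D_nearest_label_by_tokens_py; infer_instance

def Spec_nearest_label_by_tokens_py (words : List String) (hit_index : Int) (classifier : List (String × List String)) (out : Option String) : Prop := ¬ D_nearest_label_by_tokens_py words hit_index classifier → out = nearest_label_by_tokens_py_alt words hit_index classifier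
instance (words : List String) (hit_index : Int) (classifier : List (String × List String)) (out : Option String) : Decidable (Spec_nearest_label_by_tokens_py words hit_index classifier out) := by unfold Spec_nearest_label_by_tokens_py; infer_instance

def pvDiffWitness_nearest_label_by_tokens_py : List String × Int × (List (String × List String)) := (["a"], 10000, [("L", ["a"])])
def pvDiffWitnessOut_nearest_label_by_tokens_py : (Option String) × (Option String) := (none, some "L")

-- ===== CLAIM (what is proved, stated in full; the proofs are below) =====
def Claim_unchanged_nearest_label_by_tokens_py : Prop := ∀ (words : List String) (hit_index : Int) (classifier : List (String × List String)), Dom_nearest_label_by_tokens_py words hit_index classifier → Spec_nearest_label_by_tokens_py words hit_index classifier (nearest_label_by_tokens_py words hit_index classifier)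
def Claim_changed_nearest_label_by_tokens_py : Prop := Dom_nearest_label_by_tokens_py (pvDiffWitness_nearest_label_by_tokens_py.1) (pvDiffWitness_nearest_label_by_tokens_py.2.1) (pvDiffWitness_nearest_label_by_tokens_py.2.2) ∧ D_nearest_label_by_tokens_py (pvDiffWitness_nearest_label_by_tokens_py.1) (pvDiffWitness_nearest_label_by_tokens_py.2.1) (pvDiffWitness_nearest_label_by_tokens_py.2.2) ∧ nearest_label_by_tokens_py (pvDiffWitness_nearest_label_by_tokens_py.1) (pvDiffWitness_nearest_label_by_tokens_py.2.1) (pvDiffWitness_nearest_label_by_tokens_py.2.2) = pvDiffWitnessOut_nearest_label_by_tokens_py.1 ∧ nearest_label_by_tokens_py_alt (pvDiffWitness_nearest_label_by_tokens_py.1) (pvDiffWitness_nearest_label_by_tokens_py.2.1) (pvDiffWitness_nearest_label_by_tokens_py.2.2) = pvDiffWitnessOut_nearest_label_by_tokens_py.2 ∧ pvDiffWitnessOut_nearest_label_by_tokens_py.1 ≠ pvDiffWitnessOut_nearest_label_by_tokens_py.2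
def Claim_exact_nearest_label_by_tokens_py : Prop := ∀ (words : List String) (hit_index : Int) (classifier : List (String × List String)), Dom_nearest_label_by_tokens_py words hit_index classifier → D_nearest_label_by_tokens_py words hit_index classifier → nearest_label_by_tokens_py words hit_index classifier ≠ nearest_label_by_tokens_py_alt words hit_index classifier

-- ===== LEMMAS AND PROOFS =====

-- A's "keep the least key, capped by the 9999 sentinel" step.
def pvLstep (m : Option (Int × Int)) (c : Int × Int) : Option (Int × Int) :=
  if c.1 < 9999 then
    match m with
    | none => some c
    | some b => if c.1 < b.1 ∨ (c.1 = b.1 ∧ c.2 < b.2) then some c else m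
  else m

-- B's "keep the least key" step (no sentinel).
def pvLstepB (m : Option (Int × Int)) (c : Int × Int) : Option (Int × Int) :=
  match m with
  | none => some c
  | some b => if c.1 < b.1 ∨ (c.1 = b.1 ∧ c.2 < b.2) then some c else m

-- A's state (best_label, best_d) as a rendering of the abstract best key.
def pvRepr (labels : List String) (m : Option (Int × Int)) : Option String × Int :=
  match m with
  | none => (none, 9999)
  | some b => (PySem.List.pyGet? labels b.2, b.1)

-- distances, in word order, of the words matching a given token list
def pvDs (words : List String) (hit_index : Int) (toks : List String) : List Int :=
  ((PySem.List.enumerate words).filter (fun iw => decide (iw.2 ∈ toks))).map (fun iw => |iw.1 - hit_index|)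

-- all (distance, label-index) keys, label-major (A's traversal order)
def pvCA (words : List String) (hit_index : Int) (classifier : List (String × List String)) : List (Int × Int) :=
  (PySem.List.enumerate classifier).flatMap (fun kp => (pvDs words hit_index kp.2.2).map (fun d => (d, kp.1)))

-- index of the first label whose token list contains t
def pvFfl (classifier : List (String × List String)) (t : String) : Option Int :=
  ((PySem.List.enumerate classifier).find? (fun kp => decide (t ∈ kp.2.2))).map (·.1)

-- (distance, first-label-index) keys, word-major (B's traversal order)
def pvCB (words : List String) (hit_index : Int) (classifier : List (String × List String)) : List (Int × Int) :=
  (PySem.List.enumerate words).filterMap (fun iw => (pvFfl classifier iw.2).map (fun li => (|iw.1 - hit_index|, li)))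

def pvLexlt (c b : Int × Int) : Prop := c.1 < b.1 ∨ (c.1 = b.1 ∧ c.2 < b.2)

-- generic loop-shape lemmas
theorem pv_foldl_filterMap {α β γ : Type} (g : α → Option β) (f : γ → β → γ) (l : List α) (m : γ) :
    (l.filterMap g).foldl f m = l.foldl (fun a x => match g x with | none => a | some y => f a y) m := by
  induction l generalizing m with
  | nil => rfl
  | cons x t ih =>
    simp only [List.filterMap_cons, List.foldl_cons]
    cases hx : g x with
    | none => simp [ih]
    | some y => simp [List.foldl_cons, ih]

theorem pv_foldl_flatMap {α β γ : Type} (g : α → List β) (f : γ → β → γ) (l : List α) (m : γ) :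
    (l.flatMap g).foldl f m = l.foldl (fun a x => (g x).foldl f a) m := by
  induction l generalizing m with
  | nil => rfl
  | cons x t ih =>
    simp [List.flatMap_cons, List.foldl_append, ih]

theorem pvLstep_none (c : Int × Int) :
    pvLstep none c = if c.1 < 9999 then some c else none := rfl

theorem pvLstep_some (b c : Int × Int) :
    pvLstep (some b) c
      = if c.1 < 9999 then
          (if c.1 < b.1 ∨ (c.1 = b.1 ∧ c.2 < b.2) then some c else some b)
        else some b := rfl

theorem pvLstep_isSome (b : Int × Int) (c : Int × Int) : ∃ b', pvLstep (some b) c = some b' := by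
  rw [pvLstep_some]
  split_ifs
  · exact ⟨c, rfl⟩
  · exact ⟨b, rfl⟩
  · exact ⟨b, rfl⟩

theorem pv_lfold_some (t : List (Int × Int)) (b : Int × Int) :
    ∃ b', t.foldl pvLstep (some b) = some b' := by
  induction t generalizing b with
  | nil => exact ⟨b, rfl⟩
  | cons c t ih =>
    rw [List.foldl_cons]
    obtain ⟨b1, hb1⟩ := pvLstep_isSome b c
    rw [hb1]
    exact ih b1

-- one-step invariant: a pvLstep result is a capped key whose label index stays ≤ k
theorem pvLstep_inv (k : Int) (m : Option (Int × Int)) (c : Int × Int)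
    (h : ∀ b, m = some b → b.2 ≤ k ∧ b.1 < 9999) (hc : c.2 ≤ k) :
    ∀ b, pvLstep m c = some b → b.2 ≤ k ∧ b.1 < 9999 := by
  intro b hb
  cases m with
  | none =>
    rw [pvLstep_none] at hb
    split_ifs at hb
    cases hb
    exact ⟨hc, by assumption⟩
  | some b0 =>
    rw [pvLstep_some] at hb
    split_ifs at hb <;> cases hb
    · exact ⟨hc, by assumption⟩
    · exact h _ rfl
    · exact h _ rfl

-- a pvLstep result is capped
theorem pvLstep_lt (m : Option (Int × Int)) (c : Int × Int)
    (h : ∀ b, m = some b → b.1 < 9999) :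
    ∀ b, pvLstep m c = some b → b.1 < 9999 := by
  intro b hb
  cases m with
  | none =>
    rw [pvLstep_none] at hb
    split_ifs at hb
    cases hb
    assumption
  | some b0 =>
    rw [pvLstep_some] at hb
    split_ifs at hb <;> cases hb
    · assumption
    · exact h _ rfl
    · exact h _ rfl

-- invariant preservation for a run of pvLstep at a fixed label index k
theorem pvLstep_pres (ds : List Int) (k : Int) (m : Option (Int × Int))
    (h : ∀ b, m = some b → b.2 ≤ k ∧ b.1 < 9999) :
    ∀ b, ds.foldl (fun m d => pvLstep m (d, k)) m = some b → b.2 ≤ k ∧ b.1 < 9999 := by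
  induction ds generalizing m with
  | nil => simpa using h
  | cons d t ih =>
    intro b hb
    rw [List.foldl_cons] at hb
    exact ih (pvLstep m (d, k)) (pvLstep_inv k m (d, k) h (le_refl k)) b hb

-- A's inner word loop (over the match distances of one label) tracks pvLstep
theorem pv_innerA (labels : List String) (lab : String) (k : Int)
    (hlab : PySem.List.pyGet? labels k = some lab) (ds : List Int) (m : Option (Int × Int))
    (h : ∀ b, m = some b → b.2 ≤ k ∧ b.1 < 9999) :
    ds.foldl (fun st d => if d < st.2 then (some lab, d) else st) (pvRepr labels m)
      = pvRepr labels (ds.foldl (fun m d => pvLstep m (d, k)) m) := by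
  induction ds generalizing m with
  | nil => rfl
  | cons d t ih =>
    rw [List.foldl_cons, List.foldl_cons]
    have hstep : (if d < (pvRepr labels m).2 then (some lab, d) else pvRepr labels m)
        = pvRepr labels (pvLstep m (d, k)) := by
      cases m with
      | none =>
        rw [pvLstep_none]
        by_cases hd : d < 9999
        · simp [pvRepr, hd, hlab]
        · simp [pvRepr, hd]
      | some b =>
        have hb := h b rfl
        rw [pvLstep_some]
        by_cases hlt : d < b.1
        · have hd : (d, k).1 < 9999 := by simp only []; omega
          have hcond : (d, k).1 < b.1 ∨ ((d, k).1 = b.1 ∧ (d, k).2 < b.2) := Or.inl hlt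
          rw [if_pos hd, if_pos hcond]
          simp [pvRepr, hlt, hlab]
        · have hcond : ¬((d, k).1 < b.1 ∨ ((d, k).1 = b.1 ∧ (d, k).2 < b.2)) := by
            simp only [not_or, not_and, not_lt]
            exact ⟨by omega, fun h1 => by omega⟩
          simp only [if_neg hcond, ite_self]
          simp [pvRepr, hlt]
    rw [hstep]
    exact ih (pvLstep m (d, k)) (pvLstep_inv k m (d, k) h (le_refl k))

-- A's outer label loop tracks the pvLstep fold over all keys
theorem pv_outerA (labels : List String) (words : List String) (hit_index : Int) :
    ∀ (L : List (String × List String)) (j : Int) (m : Option (Int × Int)),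
    (∀ b, m = some b → b.2 < j ∧ b.1 < 9999) →
    (∀ kp ∈ PySem.List.enumerate L j, PySem.List.pyGet? labels kp.1 = some kp.2.1) →
    (PySem.List.enumerate L j).foldl
      (fun st kp =>
        (PySem.List.enumerate words).foldl
          (fun st iw =>
            if iw.2 ∈ kp.2.2 then
              let d := |iw.1 - hit_index|
              if d < st.2 then (some kp.2.1, d) else st
            else st)
          st)
      (pvRepr labels m)
      = pvRepr labels
          ((PySem.List.enumerate L j).foldl
            (fun m kp => (pvDs words hit_index kp.2.2).foldl (fun m d => pvLstep m (d, kp.1)) m) m) := by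
  intro L
  induction L with
  | nil =>
    intro j m h hlab
    simp [PySem.List.enumerate_nil]
  | cons p L ih =>
    intro j m hinv hlab
    rw [PySem.List.enumerate_cons, List.foldl_cons, List.foldl_cons]
    have hlab0 : PySem.List.pyGet? labels j = some p.1 := by
      have := hlab (j, p) (by rw [PySem.List.enumerate_cons]; exact List.mem_cons_self)
      simpa using this
    have htrans : ∀ (s : Option String × Int),
        (PySem.List.enumerate words).foldl
          (fun st iw =>
            if iw.2 ∈ (j, p).2.2 then
              let d := |iw.1 - hit_index|
              if d < st.2 then (some (j, p).2.1, d) else st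
            else st) s
        = (pvDs words hit_index p.2).foldl (fun st d => if d < st.2 then (some p.1, d) else st) s := by
      intro s
      rw [pvDs, List.foldl_map, ← PySem.List.foldl_ite_eq_foldl_filter]
    rw [htrans]
    rw [pv_innerA labels p.1 j hlab0 (pvDs words hit_index p.2) m
      (by intro b hb; have := hinv b hb; exact ⟨by omega, this.2⟩)]
    rw [ih (j + 1) _
      (by
        intro b hb
        have := pvLstep_pres (pvDs words hit_index p.2) j m
          (by intro b0 h0; have := hinv b0 h0; exact ⟨by omega, this.2⟩) b hb
        exact ⟨by omega, this.2⟩)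
      (by
        intro kp hkp
        exact hlab kp (by rw [PySem.List.enumerate_cons]; exact List.mem_cons_of_mem _ hkp))]

-- A computes pvRepr of the least capped key over pvCA
theorem pv_A_char (words : List String) (hit_index : Int) (classifier : List (String × List String)) :
    nearest_label_by_tokens_py words hit_index classifier
      = (pvRepr (classifier.map Prod.fst) ((pvCA words hit_index classifier).foldl pvLstep none)).1 := by
  unfold nearest_label_by_tokens_py
  conv_lhs => rw [show classifier = (PySem.List.enumerate classifier).map (·.2) from
    (PySem.List.map_snd_enumerate classifier 0).symm]
  rw [List.foldl_map]
  have hinv : ∀ b, (none : Option (Int × Int)) = some b → b.2 < (0 : Int) ∧ b.1 < 9999 := by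
    intro b hb; cases hb
  have hlab : ∀ kp ∈ PySem.List.enumerate classifier (0 : Int),
      PySem.List.pyGet? (classifier.map Prod.fst) kp.1 = some kp.2.1 := by
    intro kp hkp
    rw [PySem.List.mem_enumerate_iff] at hkp
    obtain ⟨kk, hkk, rfl⟩ := hkp
    simp [hkk]
  have h2 := pv_outerA (classifier.map Prod.fst) words hit_index classifier 0 none hinv hlab
  have h3 : ((PySem.List.enumerate classifier).foldl
      (fun (x : Option String × Int) (y : Int × (String × List String)) =>
        (PySem.List.enumerate words).foldl
          (fun st iw =>
            if iw.2 ∈ y.2.2 then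
              let d := |iw.1 - hit_index|
              if d < st.2 then (some y.2.1, d) else st
            else st) x)
      ((none : Option String), (9999 : Int))) =
      pvRepr (classifier.map Prod.fst)
        ((PySem.List.enumerate classifier).foldl
          (fun m kp => (pvDs words hit_index kp.2.2).foldl (fun m d => pvLstep m (d, kp.1)) m) none) := h2
  rw [h3]
  have h4 : ((PySem.List.enumerate classifier).foldl
        (fun m kp => (pvDs words hit_index kp.2.2).foldl (fun m d => pvLstep m (d, kp.1)) m)
        (none : Option (Int × Int)))
      = (pvCA words hit_index classifier).foldl pvLstep none := by
    rw [pvCA, pv_foldl_flatMap]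
    simp only [List.foldl_map]
  rw [h4]

-- the capped fold keeps a member, below the cap, minimal among all elements
theorem pv_lfold_min (l : List (Int × Int)) :
    ∀ (m : Option (Int × Int)) b, (∀ b0, m = some b0 → b0.1 < 9999) →
    l.foldl pvLstep m = some b →
    b.1 < 9999 ∧ (∀ b0, m = some b0 → ¬ pvLexlt b0 b) ∧ ∀ c ∈ l, ¬ pvLexlt c b := by
  induction l with
  | nil =>
    intro m b h hb
    simp only [List.foldl_nil] at hb
    refine ⟨h b hb, ?_, by simp⟩
    intro b0 h0
    rw [h0] at hb
    cases hb
    obtain ⟨b1, b2⟩ := b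
    simp only [pvLexlt]
    omega
  | cons c t ih =>
    intro m b h hb
    rw [List.foldl_cons] at hb
    obtain ⟨hb1, hmono, hall⟩ := ih (pvLstep m c) b (pvLstep_lt m c h) hb
    refine ⟨hb1, ?_, ?_⟩
    · intro b0 h0
      subst h0
      cases hm : pvLstep (some b0) c with
      | none =>
        rw [pvLstep_some] at hm
        split_ifs at hm
      | some b1 =>
        have h1 := hmono b1 (by rw [hm])
        rw [pvLstep_some] at hm
        split_ifs at hm with hc hlt <;> cases hm
        · obtain ⟨b01, b02⟩ := b0
          obtain ⟨c1, c2⟩ := c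
          obtain ⟨x1, x2⟩ := b
          simp only [pvLexlt] at *
          omega
        · exact h1
        · exact h1
    · intro x hx
      rcases List.mem_cons.mp hx with rfl | hx
      · by_cases hc : x.1 < 9999
        · cases hm : m with
          | none =>
            have : pvLstep none x = some x := by rw [pvLstep_none, if_pos hc]
            rw [hm] at hmono
            exact hmono x (by rw [this])
          | some b0 =>
            rw [hm] at hmono
            by_cases hlt : x.1 < b0.1 ∨ (x.1 = b0.1 ∧ x.2 < b0.2)
            · have : pvLstep (some b0) x = some x := by
                rw [pvLstep_some, if_pos hc, if_pos hlt]
              exact hmono x (by rw [this])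
            · have : pvLstep (some b0) x = some b0 := by
                rw [pvLstep_some, if_pos hc, if_neg hlt]
              have h2 := hmono b0 (by rw [this])
              obtain ⟨b01, b02⟩ := b0
              obtain ⟨c1, c2⟩ := x
              obtain ⟨x1, x2⟩ := b
              simp only [pvLexlt] at *
              omega
        · obtain ⟨c1, c2⟩ := x
          obtain ⟨x1, x2⟩ := b
          simp only [pvLexlt]
          simp only [] at hc
          omega
      · exact hall x hx

theorem pvLstep_cases (m : Option (Int × Int)) (c : Int × Int) : pvLstep m c = m ∨ pvLstep m c = some c := by
  cases m with
  | none =>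
    rw [pvLstep_none]
    split_ifs
    · exact Or.inr rfl
    · exact Or.inl rfl
  | some b =>
    rw [pvLstep_some]
    split_ifs
    · exact Or.inr rfl
    · exact Or.inl rfl
    · exact Or.inl rfl

theorem pv_lfold_mem (l : List (Int × Int)) :
    ∀ (m : Option (Int × Int)) b, l.foldl pvLstep m = some b → (m = some b ∨ b ∈ l) := by
  induction l with
  | nil =>
    intro m b hb
    exact Or.inl hb
  | cons c t ih =>
    intro m b hb
    rw [List.foldl_cons] at hb
    rcases ih (pvLstep m c) b hb with h1 | h1
    · rcases pvLstep_cases m c with h2 | h2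
      · exact Or.inl (h2 ▸ h1)
      · rw [h2] at h1
        cases h1
        exact Or.inr List.mem_cons_self
    · exact Or.inr (List.mem_cons_of_mem _ h1)

theorem pv_lfold_none (l : List (Int × Int)) :
    l.foldl pvLstep none = none ↔ ∀ c ∈ l, 9999 ≤ c.1 := by
  induction l with
  | nil => simp
  | cons c t ih =>
    rw [List.foldl_cons]
    by_cases hc : c.1 < 9999
    · rw [pvLstep_none, if_pos hc]
      obtain ⟨b', hb'⟩ := pv_lfold_some t c
      rw [hb']
      simp only [reduceCtorEq, false_iff]
      intro hall
      exact absurd (hall c List.mem_cons_self) (by omega)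
    · rw [pvLstep_none, if_neg hc, ih]
      constructor
      · intro hall x hx
        rcases List.mem_cons.mp hx with rfl | hx
        · omega
        · exact hall x hx
      · intro hall x hx
        exact hall x (List.mem_cons_of_mem _ hx)

-- the uncapped fold: basic facts
theorem pvLstepB_some (b c : Int × Int) :
    pvLstepB (some b) c = if c.1 < b.1 ∨ (c.1 = b.1 ∧ c.2 < b.2) then some c else some b := rfl

theorem pvB_fold_some (t : List (Int × Int)) (b : Int × Int) :
    ∃ b', t.foldl pvLstepB (some b) = some b' := by
  induction t generalizing b with
  | nil => exact ⟨b, rfl⟩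
  | cons c t ih =>
    rw [List.foldl_cons, pvLstepB_some]
    split_ifs
    · exact ih c
    · exact ih b

theorem pvLstepB_cases (m : Option (Int × Int)) (c : Int × Int) : pvLstepB m c = m ∨ pvLstepB m c = some c := by
  cases m with
  | none => exact Or.inr rfl
  | some b =>
    rw [pvLstepB_some]
    split_ifs
    · exact Or.inr rfl
    · exact Or.inl rfl

theorem pvB_fold_mem (l : List (Int × Int)) :
    ∀ (m : Option (Int × Int)) b, l.foldl pvLstepB m = some b → (m = some b ∨ b ∈ l) := by
  induction l with
  | nil =>
    intro m b hb
    exact Or.inl hb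
  | cons c t ih =>
    intro m b hb
    rw [List.foldl_cons] at hb
    rcases ih (pvLstepB m c) b hb with h1 | h1
    · rcases pvLstepB_cases m c with h2 | h2
      · exact Or.inl (h2 ▸ h1)
      · rw [h2] at h1
        cases h1
        exact Or.inr List.mem_cons_self
    · exact Or.inr (List.mem_cons_of_mem _ h1)

theorem pvB_fold_min (l : List (Int × Int)) :
    ∀ (m : Option (Int × Int)) b, l.foldl pvLstepB m = some b →
    (∀ b0, m = some b0 → ¬ pvLexlt b0 b) ∧ ∀ c ∈ l, ¬ pvLexlt c b := by
  induction l with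
  | nil =>
    intro m b hb
    simp only [List.foldl_nil] at hb
    refine ⟨?_, by simp⟩
    intro b0 h0
    rw [h0] at hb
    cases hb
    obtain ⟨b1, b2⟩ := b
    simp only [pvLexlt]
    omega
  | cons c t ih =>
    intro m b hb
    rw [List.foldl_cons] at hb
    obtain ⟨hmono, hall⟩ := ih (pvLstepB m c) b hb
    refine ⟨?_, ?_⟩
    · intro b0 h0
      subst h0
      cases hm : pvLstepB (some b0) c with
      | none =>
        rw [pvLstepB_some] at hm
        split_ifs at hm
      | some b1 =>
        have h1 := hmono b1 (by rw [hm])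
        rw [pvLstepB_some] at hm
        split_ifs at hm with hlt <;> cases hm
        · obtain ⟨b01, b02⟩ := b0
          obtain ⟨c1, c2⟩ := c
          obtain ⟨x1, x2⟩ := b
          simp only [pvLexlt] at *
          omega
        · exact h1
    · intro x hx
      rcases List.mem_cons.mp hx with rfl | hx
      · cases hm : m with
        | none =>
          rw [hm] at hmono
          exact hmono x (by rw [show pvLstepB none x = some x from rfl])
        | some b0 =>
          rw [hm] at hmono
          by_cases hlt : x.1 < b0.1 ∨ (x.1 = b0.1 ∧ x.2 < b0.2)
          · have : pvLstepB (some b0) x = some x := by rw [pvLstepB_some, if_pos hlt]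
            exact hmono x (by rw [this])
          · have : pvLstepB (some b0) x = some b0 := by rw [pvLstepB_some, if_neg hlt]
            have h2 := hmono b0 (by rw [this])
            obtain ⟨b01, b02⟩ := b0
            obtain ⟨c1, c2⟩ := x
            obtain ⟨x1, x2⟩ := b
            simp only [pvLexlt] at *
            omega
      · exact hall x hx

-- membership characterizations
theorem pv_mem_CA {words : List String} {hit_index : Int} {classifier : List (String × List String)} {c : Int × Int} :
    c ∈ pvCA words hit_index classifier ↔
      ∃ kp ∈ PySem.List.enumerate classifier, ∃ iw ∈ PySem.List.enumerate words,
        iw.2 ∈ kp.2.2 ∧ c = (|iw.1 - hit_index|, kp.1) := by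
  unfold pvCA pvDs
  simp only [List.mem_flatMap, List.mem_map, List.mem_filter, decide_eq_true_eq]
  constructor
  · rintro ⟨kp, hkp, d, ⟨iw, ⟨hiw, hmem⟩, rfl⟩, rfl⟩
    exact ⟨kp, hkp, iw, hiw, hmem, rfl⟩
  · rintro ⟨kp, hkp, iw, hiw, hmem, rfl⟩
    exact ⟨kp, hkp, |iw.1 - hit_index|, ⟨iw, ⟨hiw, hmem⟩, rfl⟩, rfl⟩

theorem pv_mem_CB {words : List String} {hit_index : Int} {classifier : List (String × List String)} {c : Int × Int} :
    c ∈ pvCB words hit_index classifier ↔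
      ∃ iw ∈ PySem.List.enumerate words, ∃ k, pvFfl classifier iw.2 = some k ∧ c = (|iw.1 - hit_index|, k) := by
  unfold pvCB
  simp only [List.mem_filterMap, Option.map_eq_some_iff]
  constructor
  · rintro ⟨iw, hiw, li, hffl, rfl⟩
    exact ⟨iw, hiw, li, hffl, rfl⟩
  · rintro ⟨iw, hiw, k, hffl, rfl⟩
    exact ⟨iw, hiw, k, hffl, rfl⟩

theorem pv_ffl_sound {classifier : List (String × List String)} {t : String} {k : Int}
    (h : pvFfl classifier t = some k) :
    ∃ kp ∈ PySem.List.enumerate classifier, kp.1 = k ∧ t ∈ kp.2.2 := by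
  unfold pvFfl at h
  rw [Option.map_eq_some_iff] at h
  obtain ⟨kp, hf, hk⟩ := h
  refine ⟨kp, List.mem_of_find?_eq_some hf, hk, ?_⟩
  have := List.find?_some hf
  simpa using this

theorem pv_ffl_min {classifier : List (String × List String)} {t : String} {kp : Int × (String × List String)}
    (hm : kp ∈ PySem.List.enumerate classifier) (ht : t ∈ kp.2.2) :
    ∃ k, pvFfl classifier t = some k ∧ k ≤ kp.1 := by
  unfold pvFfl
  have aux : ∀ (L : List (String × List String)) (j : Int) (kp : Int × (String × List String)),
      kp ∈ PySem.List.enumerate L j → t ∈ kp.2.2 →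
      ∃ k, ((PySem.List.enumerate L j).find? (fun q => decide (t ∈ q.2.2))).map (·.1) = some k ∧ k ≤ kp.1 := by
    intro L
    induction L with
    | nil =>
      intro j kp h
      simp [PySem.List.enumerate_nil] at h
    | cons p L ih =>
      intro j kp hm2 ht2
      rw [PySem.List.enumerate_cons] at hm2
      rw [PySem.List.enumerate_cons, List.find?_cons]
      by_cases hp : t ∈ p.2
      · refine ⟨j, ?_, ?_⟩
        · simp [hp]
        · rcases List.mem_cons.mp hm2 with rfl | hm3
          · exact le_refl j
          · rw [PySem.List.mem_enumerate_iff] at hm3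
            obtain ⟨kk, hkk, rfl⟩ := hm3
            show j ≤ j + 1 + (kk : Int)
            omega
      · rcases List.mem_cons.mp hm2 with rfl | hm3
        · exact absurd ht2 hp
        · obtain ⟨k, hk, hle⟩ := ih (j + 1) kp hm3 ht2
          refine ⟨k, ?_, hle⟩
          simpa [hp] using hk
  exact aux classifier 0 kp hm ht

theorem pv_CB_sub_CA {words : List String} {hit_index : Int} {classifier : List (String × List String)} {c : Int × Int}
    (h : c ∈ pvCB words hit_index classifier) : c ∈ pvCA words hit_index classifier := by
  rw [pv_mem_CB] at h
  obtain ⟨iw, hiw, k, hffl, rfl⟩ := h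
  obtain ⟨kp, hkp, hk1, ht⟩ := pv_ffl_sound hffl
  rw [pv_mem_CA]
  exact ⟨kp, hkp, iw, hiw, ht, by rw [hk1]⟩

theorem pv_CA_dom {words : List String} {hit_index : Int} {classifier : List (String × List String)} {c : Int × Int}
    (h : c ∈ pvCA words hit_index classifier) :
    ∃ c' ∈ pvCB words hit_index classifier, c'.1 = c.1 ∧ c'.2 ≤ c.2 := by
  rw [pv_mem_CA] at h
  obtain ⟨kp, hkp, iw, hiw, hmem, rfl⟩ := h
  obtain ⟨k, hk, hle⟩ := pv_ffl_min hkp hmem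
  refine ⟨(|iw.1 - hit_index|, k), ?_, rfl, hle⟩
  rw [pv_mem_CB]
  exact ⟨iw, hiw, k, hk, rfl⟩

-- the uncapped least keys over CA and CB coincide
theorem pv_minB_eq (words : List String) (hit_index : Int) (classifier : List (String × List String)) :
    (pvCA words hit_index classifier).foldl pvLstepB none = (pvCB words hit_index classifier).foldl pvLstepB none := by
  cases hA : (pvCA words hit_index classifier).foldl pvLstepB none with
  | none =>
    cases hB : (pvCB words hit_index classifier).foldl pvLstepB none with
    | none => rfl
    | some b =>
      have hmemB : b ∈ pvCB words hit_index classifier := by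
        rcases pvB_fold_mem _ none b hB with h | h
        · exact absurd h (by simp)
        · exact h
      have hmemA := pv_CB_sub_CA hmemB
      cases hca : pvCA words hit_index classifier with
      | nil => rw [hca] at hmemA; simp at hmemA
      | cons c t =>
        rw [hca, List.foldl_cons] at hA
        obtain ⟨b', hb'⟩ := pvB_fold_some t c
        rw [show pvLstepB none c = some c from rfl, hb'] at hA
        cases hA
  | some b =>
    cases hB : (pvCB words hit_index classifier).foldl pvLstepB none with
    | none =>
      have hmemA : b ∈ pvCA words hit_index classifier := by
        rcases pvB_fold_mem _ none b hA with h | h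
        · exact absurd h (by simp)
        · exact h
      obtain ⟨c2, hc2, _, _⟩ := pv_CA_dom hmemA
      cases hcb : pvCB words hit_index classifier with
      | nil => rw [hcb] at hc2; simp at hc2
      | cons c t =>
        rw [hcb, List.foldl_cons] at hB
        obtain ⟨b', hb'⟩ := pvB_fold_some t c
        rw [show pvLstepB none c = some c from rfl, hb'] at hB
        cases hB
    | some b2 =>
      have hmemA : b ∈ pvCA words hit_index classifier := by
        rcases pvB_fold_mem _ none b hA with h | h
        · exact absurd h (by simp)
        · exact h
      have hmemB : b2 ∈ pvCB words hit_index classifier := by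
        rcases pvB_fold_mem _ none b2 hB with h | h
        · exact absurd h (by simp)
        · exact h
      have hminA := (pvB_fold_min _ none b hA).2
      have hminB := (pvB_fold_min _ none b2 hB).2
      have h1 : ¬ pvLexlt b2 b := hminA b2 (pv_CB_sub_CA hmemB)
      obtain ⟨c2, hc2, hceq, hcle⟩ := pv_CA_dom hmemA
      have h2 : ¬ pvLexlt c2 b2 := hminB c2 hc2
      obtain ⟨x1, x2⟩ := b
      obtain ⟨y1, y2⟩ := b2
      obtain ⟨z1, z2⟩ := c2
      simp only [pvLexlt, not_or, not_and, not_lt] at h1 h2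
      simp only [] at hceq hcle
      simp only [Option.some.injEq, Prod.mk.injEq]
      omega

-- with an element below the sentinel present, the capped and uncapped folds agree
theorem pv_cap_irrelevant (l : List (Int × Int)) (c0 : Int × Int) (hc0 : c0 ∈ l) (hlt : c0.1 < 9999) :
    l.foldl pvLstep none = l.foldl pvLstepB none := by
  cases hA : l.foldl pvLstep none with
  | none =>
    have := (pv_lfold_none l).mp hA c0 hc0
    omega
  | some b =>
    cases hB : l.foldl pvLstepB none with
    | none =>
      cases hl : l with
      | nil => subst hl; simp at hc0
      | cons c t =>
        rw [hl, List.foldl_cons] at hB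
        obtain ⟨b', hb'⟩ := pvB_fold_some t c
        rw [show pvLstepB none c = some c from rfl, hb'] at hB
        cases hB
    | some b2 =>
      have hmemA : b ∈ l := by
        rcases pv_lfold_mem l none b hA with h | h
        · exact absurd h (by simp)
        · exact h
      have hmemB : b2 ∈ l := by
        rcases pvB_fold_mem l none b2 hB with h | h
        · exact absurd h (by simp)
        · exact h
      have hminA := pv_lfold_min l none b (by intro b0 h0; cases h0) hA
      have hminB := (pvB_fold_min l none b2 hB).2
      have h1 : ¬ pvLexlt b2 b := hminA.2.2 b2 hmemB
      have h2 : ¬ pvLexlt b b2 := hminB b hmemA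
      obtain ⟨x1, x2⟩ := b
      obtain ⟨y1, y2⟩ := b2
      simp only [pvLexlt, not_or, not_and, not_lt] at h1 h2
      simp only [Option.some.injEq, Prod.mk.injEq]
      omega

-- the dictionary built by B answers pvFfl
theorem pv_dict_inner (toks : List String) (k : Int) (acc : PySem.Dict String Int) (t : String) :
    (toks.foldl (fun d t' => if (d.get? t').isNone then d.insert t' k else d) acc).get? t
      = if (acc.get? t).isNone ∧ t ∈ toks then some k else acc.get? t := by
  induction toks generalizing acc with
  | nil => simp
  | cons t2 ts ih =>
    rw [List.foldl_cons]
    cases hacc : acc.get? t2 with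
    | none =>
      simp only [Option.isNone_none, if_true]
      rw [ih]
      by_cases ht : t = t2
      · subst ht
        simp [PySem.Dict.get?_insert_self, hacc]
      · rw [PySem.Dict.get?_insert_of_ne acc k ht]
        simp [List.mem_cons, ht]
    | some v =>
      simp only [Option.isNone_some, Bool.false_eq_true, if_false]
      rw [ih]
      by_cases ht : t = t2
      · subst ht
        simp [hacc]
      · simp [List.mem_cons, ht]

theorem pv_dict_outer (t : String) :
    ∀ (L : List (String × List String)) (j : Int) (acc : PySem.Dict String Int),
    ((PySem.List.enumerate L j).foldl
        (fun acc kp => kp.2.2.foldl (fun d t' => if (d.get? t').isNone then d.insert t' kp.1 else d) acc) acc).get? t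
      = match acc.get? t with
        | some v => some v
        | none => ((PySem.List.enumerate L j).find? (fun kp => decide (t ∈ kp.2.2))).map (·.1) := by
  intro L
  induction L with
  | nil =>
    intro j acc
    simp only [PySem.List.enumerate_nil, List.foldl_nil, List.find?_nil, Option.map_none]
    cases acc.get? t <;> rfl
  | cons p L ih =>
    intro j acc
    rw [PySem.List.enumerate_cons, List.foldl_cons, ih (j + 1), pv_dict_inner p.2 j acc t]
    rw [List.find?_cons]
    cases hacc : acc.get? t with
    | some v => simp
    | none =>
      by_cases hp : t ∈ p.2
      · simp [hp]
      · simp [hp]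

-- B computes pvRepr of the uncapped least key over pvCB
theorem pv_B_char (words : List String) (hit_index : Int) (classifier : List (String × List String)) :
    nearest_label_by_tokens_py_alt words hit_index classifier
      = (pvRepr (classifier.map Prod.fst) ((pvCB words hit_index classifier).foldl pvLstepB none)).1 := by
  unfold nearest_label_by_tokens_py_alt
  rw [PySem.List.foldl_prod_mk
    (f := fun (a : List String) (kp : Int × (String × List String)) => a ++ [kp.2.1])
    (g := fun (d : PySem.Dict String Int) (kp : Int × (String × List String)) =>
      kp.2.2.foldl (fun d t => if (d.get? t).isNone then d.insert t kp.1 else d) d)]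
  have hlabels : (PySem.List.enumerate classifier).foldl
      (fun (a : List String) (kp : Int × (String × List String)) => a ++ [kp.2.1]) []
      = classifier.map Prod.fst := by
    rw [PySem.List.foldl_append_singleton_eq_map, List.nil_append]
    conv_rhs => rw [← PySem.List.map_snd_enumerate classifier 0, List.map_map]
    rfl
  have hget : ∀ w, ((PySem.List.enumerate classifier).foldl
      (fun (d : PySem.Dict String Int) (kp : Int × (String × List String)) =>
        kp.2.2.foldl (fun d t => if (d.get? t).isNone then d.insert t kp.1 else d) d)
      PySem.Dict.empty).get? w = pvFfl classifier w := by
    intro w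
    rw [pv_dict_outer w classifier 0 PySem.Dict.empty]
    simp [pvFfl, PySem.Dict.get?_empty]
  simp only [hlabels, hget]
  have hbest : (PySem.List.enumerate words).foldl
      (fun (best : Option (Int × Int)) (iw : Int × String) =>
        match pvFfl classifier iw.2 with
        | none => best
        | some li =>
          let key := (|iw.1 - hit_index|, li)
          match best with
          | none => some key
          | some b => if key.1 < b.1 ∨ (key.1 = b.1 ∧ key.2 < b.2) then some key else best) none
      = (pvCB words hit_index classifier).foldl pvLstepB none := by
    rw [pvCB, pv_foldl_filterMap]
    refine PySem.List.foldl_congr_mem _ _ _ _ ?_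
    intro a iw _
    cases h : pvFfl classifier iw.2 with
    | none => simp
    | some li => simp [pvLstepB]
  rw [hbest]
  cases hres : (pvCB words hit_index classifier).foldl pvLstepB none with
  | none => simp [pvRepr]
  | some b => simp [pvRepr]

-- bridging D_ with the key list pvCA
theorem pv_D1_iff (words : List String) (classifier : List (String × List String)) (hit_index : Int) :
    (∃ iw ∈ PySem.List.enumerate words, ∃ p ∈ classifier, iw.2 ∈ p.2)
      ↔ ∃ c, c ∈ pvCA words hit_index classifier := by
  constructor
  · rintro ⟨iw, hiw, p, hp, hmem⟩
    obtain ⟨kk, hkk, hget⟩ := List.mem_iff_getElem.mp hp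
    refine ⟨(|iw.1 - hit_index|, (kk : Int)), pv_mem_CA.mpr ⟨((kk : Int), p), ?_, iw, hiw, hmem, rfl⟩⟩
    rw [PySem.List.mem_enumerate_iff]
    exact ⟨kk, hkk, by rw [hget]; simp⟩
  · rintro ⟨c, hc⟩
    rw [pv_mem_CA] at hc
    obtain ⟨kp, hkp, iw, hiw, hmem, rfl⟩ := hc
    rw [PySem.List.mem_enumerate_iff] at hkp
    obtain ⟨kk, hkk, rfl⟩ := hkp
    exact ⟨iw, hiw, classifier[kk], List.getElem_mem hkk, hmem⟩

theorem pv_D2_iff (words : List String) (classifier : List (String × List String)) (hit_index : Int) :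
    (∀ iw ∈ PySem.List.enumerate words, (∃ p ∈ classifier, iw.2 ∈ p.2) → 9999 ≤ |iw.1 - hit_index|)
      ↔ ∀ c ∈ pvCA words hit_index classifier, 9999 ≤ c.1 := by
  constructor
  · intro h c hc
    rw [pv_mem_CA] at hc
    obtain ⟨kp, hkp, iw, hiw, hmem, rfl⟩ := hc
    rw [PySem.List.mem_enumerate_iff] at hkp
    obtain ⟨kk, hkk, rfl⟩ := hkp
    exact h iw hiw ⟨classifier[kk], List.getElem_mem hkk, hmem⟩
  · rintro h iw hiw ⟨p, hp, hmem⟩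
    obtain ⟨kk, hkk, hget⟩ := List.mem_iff_getElem.mp hp
    have : (|iw.1 - hit_index|, (kk : Int)) ∈ pvCA words hit_index classifier := by
      refine pv_mem_CA.mpr ⟨((kk : Int), p), ?_, iw, hiw, hmem, rfl⟩
      rw [PySem.List.mem_enumerate_iff]
      exact ⟨kk, hkk, by rw [hget]; simp⟩
    exact h _ this

-- ===== VERDICT (by name: the statements are the Claim_ definitions above) =====
theorem nearest_label_by_tokens_py_spec : Claim_unchanged_nearest_label_by_tokens_py := by
  intro words hit_index classifier _ hnd
  rw [pv_A_char, pv_B_char, ← pv_minB_eq]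
  unfold D_nearest_label_by_tokens_py at hnd
  rw [not_and_or] at hnd
  rcases hnd with h1 | h2
  · -- no match at all: pvCA is empty
    rw [pv_D1_iff words classifier hit_index, not_exists] at h1
    have hnil : pvCA words hit_index classifier = [] := by
      cases h : pvCA words hit_index classifier with
      | nil => rfl
      | cons c t => exact absurd (h ▸ List.mem_cons_self) (h1 c)
    rw [hnil]
    rfl
  · -- some match lies below the sentinel
    rw [pv_D2_iff words classifier hit_index] at h2
    push Not at h2
    obtain ⟨c0, hc0, hlt⟩ := h2
    rw [pv_cap_irrelevant (pvCA words hit_index classifier) c0 hc0 (by omega)]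

theorem nearest_label_by_tokens_py_changed : Claim_changed_nearest_label_by_tokens_py := by
  unfold Claim_changed_nearest_label_by_tokens_py; decide

theorem nearest_label_by_tokens_py_tight : Claim_exact_nearest_label_by_tokens_py := by
  intro words hit_index classifier _ hD
  obtain ⟨hD1, hD2⟩ := hD
  rw [pv_A_char, pv_B_char]
  -- A's side is none: every key is at or above the sentinel
  have hAnone : (pvCA words hit_index classifier).foldl pvLstep none = none :=
    (pv_lfold_none _).mpr ((pv_D2_iff words classifier hit_index).mp hD2)
  rw [hAnone]
  -- B's side is some label
  obtain ⟨c, hc⟩ := (pv_D1_iff words classifier hit_index).mp hD1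
  obtain ⟨c', hc', _, _⟩ := pv_CA_dom hc
  have hBsome : ∃ b, (pvCB words hit_index classifier).foldl pvLstepB none = some b := by
    cases hcb : pvCB words hit_index classifier with
    | nil => rw [hcb] at hc'; simp at hc'
    | cons c0 t =>
      rw [List.foldl_cons, show pvLstepB none c0 = some c0 from rfl]
      exact pvB_fold_some t c0
  obtain ⟨b, hb⟩ := hBsome
  rw [hb]
  -- the label index of b is a valid index into the labels list
  have hmemB : b ∈ pvCB words hit_index classifier := by
    rcases pvB_fold_mem _ none b hb with h | h
    · exact absurd h (by simp)
    · exact h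
  rw [pv_mem_CB] at hmemB
  obtain ⟨iw, hiw, k, hffl, rfl⟩ := hmemB
  obtain ⟨kp, hkp, hk1, _⟩ := pv_ffl_sound hffl
  rw [PySem.List.mem_enumerate_iff] at hkp
  obtain ⟨kk, hkk, rfl⟩ := hkp
  simp only [pvRepr]
  rw [← hk1]
  simp [hkk]
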